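-- pv_equiv track=rewrite | github.com/shlok-dadhich/Chatbot | backend/memory.py | format_memories_plain
-- ===== SOURCE A (Python) =====
-- def format_memories_plain(memories_raw: list[dict]) -> str:
--     """Format memories as plain text grouped by category for the chat system prompt."""
--     if not memories_raw:
--         return "(empty)"
--     groups: dict[str, list[str]] = {
--         "profile":     [],
--         "preferences": [],
--         "projects":    [],
--         "goals":       [],
--     }
--     for m in memories_raw:
--         cat = m.get("category", "profile")
--         if cat not in groups:
--             cat = "profile"
--         groups[cat].append(m["data"])
--
--     lines: list[str] = []
--     for cat in ("profile", "preferences", "projects", "goals"):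
--         if groups[cat]:
--             lines.append(f"{cat.capitalize()}:")
--             lines.extend([f"- {item}" for item in groups[cat]])
--     return "\n".join(lines) if lines else "(empty)"
-- ===== SOURCE B (Python) =====
-- def format_memories_plain(memories_raw: list[dict]) -> str:
--     """Format memories as plain text grouped by category for the chat system prompt."""
--     def norm(m):
--         c = m.get("category", "profile")
--         return c if c in ("preferences", "projects", "goals") else "profile"
--
--     lines: list[str] = []
--     for cat in ("profile", "preferences", "projects", "goals"):
--         items = [m["data"] for m in memories_raw if norm(m) == cat]
--         if items:
--             lines.append(cat.capitalize() + ":")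
--             lines.extend("- " + it for it in items)
--     return "\n".join(lines) if lines else "(empty)"
-- ===== Notes on version B (the rewrite author's own statement) =====
-- stated objective: simpler
-- what changed: Drops the grouping dict entirely: one filtered pass over memories_raw per fixed category (with the 'profile' catch-all as an explicit normalizer), appending header and bullets directly; no mutable groups structure and no separate empty-input guard.
import Mathlib
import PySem

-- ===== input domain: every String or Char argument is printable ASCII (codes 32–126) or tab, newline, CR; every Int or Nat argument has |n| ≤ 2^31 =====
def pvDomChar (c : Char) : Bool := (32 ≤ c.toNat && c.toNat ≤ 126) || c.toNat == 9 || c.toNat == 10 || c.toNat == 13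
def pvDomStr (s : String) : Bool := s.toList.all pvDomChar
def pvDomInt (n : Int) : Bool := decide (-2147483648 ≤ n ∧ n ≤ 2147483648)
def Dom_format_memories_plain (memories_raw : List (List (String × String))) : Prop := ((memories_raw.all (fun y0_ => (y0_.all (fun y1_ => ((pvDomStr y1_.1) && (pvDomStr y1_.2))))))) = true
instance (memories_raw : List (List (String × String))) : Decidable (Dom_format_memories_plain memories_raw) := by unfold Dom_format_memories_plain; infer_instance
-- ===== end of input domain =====

-- B replaces A's mutable grouping dict by one filtered pass per fixed category; same output.
-- Pre_ excludes memories lacking the "data" key, where the Python (both A and B) raises KeyError.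

-- ===== PORT A =====
-- m["data"]; Pre_ guarantees the key exists (Python raises KeyError otherwise)
def fmpData (m : List (String × String)) : String :=
  (PySem.Dict.mk m).getD "data" ""

-- cat.capitalize(): first char uppercased, rest lowered; exact on ASCII (only applied to ASCII literals here)
def fmpCap (s : String) : String :=
  match s.toList with
  | [] => ""
  | c :: rest => String.ofList (PySem.Chars.upperChar c :: PySem.Chars.lower rest)

def fmpInit : PySem.Dict String (List String) :=
  PySem.Dict.mk [("profile", []), ("preferences", []), ("projects", []), ("goals", [])]

def format_memories_plain (memories_raw : List (List (String × String))) : String :=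
  if memories_raw = [] then "(empty)" else
  let groups : PySem.Dict String (List String) :=
    memories_raw.foldl (fun g m =>
      let cat := (PySem.Dict.mk m).getD "category" "profile"
      let cat := if g.contains cat then cat else "profile"
      g.modify cat [] (· ++ [fmpData m])) fmpInit
  let lines : List String :=
    ["profile", "preferences", "projects", "goals"].foldl (fun lines cat =>
      if groups.getD cat [] ≠ [] then
        lines ++ [fmpCap cat ++ ":"] ++ (groups.getD cat []).map (fun item => "- " ++ item)
      else lines) []
  if lines ≠ [] then PySem.Str.join "\n" lines else "(empty)"

-- ===== PORT B =====
def fmpNorm (m : List (String × String)) : String :=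
  let c := (PySem.Dict.mk m).getD "category" "profile"
  if c = "preferences" ∨ c = "projects" ∨ c = "goals" then c else "profile"

def format_memories_plain_alt (memories_raw : List (List (String × String))) : String :=
  let lines : List String :=
    ["profile", "preferences", "projects", "goals"].foldl (fun lines cat =>
      let items := (memories_raw.filter (fun m => fmpNorm m == cat)).map fmpData
      if items.isEmpty then lines
      else lines ++ [fmpCap cat ++ ":"] ++ items.map (fun it => "- " ++ it)) []
  if lines.isEmpty then "(empty)" else PySem.Str.join "\n" lines

-- ===== PRECONDITION & SPEC =====
-- Pre_ excludes inputs where some memory lacks the "data" key: Python A raises KeyError there (B too).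
def Pre_format_memories_plain (memories_raw : List (List (String × String))) : Prop :=
  ∀ m ∈ memories_raw, (PySem.Dict.mk m).contains "data" = true
instance (memories_raw : List (List (String × String))) : Decidable (Pre_format_memories_plain memories_raw) := by unfold Pre_format_memories_plain; infer_instance

def pvWitness_format_memories_plain : (List (List (String × String))) :=
  [[("category", "preferences"), ("data", "likes tea")], [("data", "named Sam")], [("category", "goals"), ("data", "ship it")]]

def Spec_format_memories_plain (memories_raw : List (List (String × String))) (out : String) : Prop := out = format_memories_plain_alt memories_raw
instance (memories_raw : List (List (String × String))) (out : String) : Decidable (Spec_format_memories_plain memories_raw out) := by unfold Spec_format_memories_plain; infer_instance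

-- ===== CLAIM (what is proved, stated in full; the proofs are below) =====
def Claim_equal_format_memories_plain : Prop := ∀ (memories_raw : List (List (String × String))), Dom_format_memories_plain memories_raw → Pre_format_memories_plain memories_raw → Spec_format_memories_plain memories_raw (format_memories_plain memories_raw)

-- ===== LEMMAS AND PROOFS =====

theorem fmp_contains_init (x : String) :
    fmpInit.contains x = ("profile" == x || ("preferences" == x || ("projects" == x || "goals" == x))) := by
  simp [fmpInit, PySem.Dict.contains_mk]

theorem fmp_norm_eq (c0 : String) :
    (if ("profile" == c0 || ("preferences" == c0 || ("projects" == c0 || "goals" == c0))) = true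
      then c0 else "profile")
    = (if c0 = "preferences" ∨ c0 = "projects" ∨ c0 = "goals" then c0 else "profile") := by
  by_cases h1 : c0 = "preferences"
  · subst h1; decide
  by_cases h2 : c0 = "projects"
  · subst h2; decide
  by_cases h3 : c0 = "goals"
  · subst h3; decide
  by_cases h0 : c0 = "profile"
  · subst h0; decide
  · simp [beq_iff_eq, Ne.symm h0, Ne.symm h1, Ne.symm h2, Ne.symm h3, h1, h2, h3]

theorem fmp_norm_mem (c0 : String) :
    fmpInit.contains (if c0 = "preferences" ∨ c0 = "projects" ∨ c0 = "goals" then c0 else "profile") = true := by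
  split_ifs with h
  · rcases h with h | h | h <;> rw [h] <;> rfl
  · rfl

theorem fmp_groups_getD (l : List (List (String × String)))
    (g : PySem.Dict String (List String))
    (hc : ∀ x, g.contains x = fmpInit.contains x) (c : String) :
    (l.foldl (fun g m =>
      let cat := (PySem.Dict.mk m).getD "category" "profile"
      let cat := if g.contains cat then cat else "profile"
      g.modify cat [] (· ++ [fmpData m])) g).getD c []
    = g.getD c [] ++ (l.filter (fun m => fmpNorm m == c)).map fmpData := by
  induction l generalizing g with
  | nil => simp
  | cons m t ih =>
    have hcat : (if g.contains ((PySem.Dict.mk m).getD "category" "profile")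
        then (PySem.Dict.mk m).getD "category" "profile" else "profile") = fmpNorm m := by
      rw [hc, fmp_contains_init]
      exact fmp_norm_eq _
    have hmem : fmpInit.contains (fmpNorm m) = true := fmp_norm_mem _
    have hc' : ∀ x, (g.modify (fmpNorm m) [] (· ++ [fmpData m])).contains x = fmpInit.contains x := by
      intro x
      rw [PySem.Dict.contains_modify, hc]
      by_cases hx : x = fmpNorm m
      · simp [hx, hmem]
      · simp [hx]
    simp only [List.foldl_cons, List.filter_cons, hcat]
    rw [ih _ hc', PySem.Dict.getD_modify]
    by_cases hcm : fmpNorm m = c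
    · simp [hcm]
    · simp [hcm, Ne.symm hcm]

theorem fmp_init_getD (c : String) : fmpInit.getD c [] = [] := by
  simp [fmpInit, PySem.Dict.getD_eq_get?_getD, PySem.Dict.get?_mk_cons]
  split_ifs <;> rfl

-- ===== VERDICT (by name: the statement is the Claim_ definition above) =====
theorem format_memories_plain_spec : Claim_equal_format_memories_plain := by
  intro mr _ _
  unfold Spec_format_memories_plain format_memories_plain format_memories_plain_alt
  by_cases hmr : mr = []
  · subst hmr; rfl
  · have hg : ∀ c : String,
        (mr.foldl (fun g m =>
          let cat := (PySem.Dict.mk m).getD "category" "profile"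
          let cat := if g.contains cat then cat else "profile"
          g.modify cat [] (· ++ [fmpData m])) fmpInit).getD c []
        = (mr.filter (fun m => fmpNorm m == c)).map fmpData := by
      intro c
      rw [fmp_groups_getD mr fmpInit (fun _ => rfl) c, fmp_init_getD]
      rfl
    rw [if_neg hmr]
    simp only [List.foldl_cons, List.foldl_nil, hg]
    simp only [ne_eq, ite_not, List.isEmpty_iff]
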